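-- pv_equiv track=rewrite | github.com/kswoo97/kaist-sr-hypergraph | utils.py | give_window_stride
-- ===== SOURCE A (Python) =====
-- def give_window_stride(final, w_size) :
--
--     each_buckets = []
--
--     for i in range(final) :
--         if i < w_size - 1 :
--             each_buckets.append([t for t in range(i + 1)])
--         else :
--             each_buckets.append([t + 1 for t in range(i - w_size, i)])
--
--     return each_buckets
-- ===== SOURCE B (Python) =====
-- def give_window_stride(final, w_size):
--     base = list(range(final))
--     return [base[max(0, i - w_size + 1): i + 1] for i in range(final)]
-- ===== Notes on version B (the rewrite author's own statement) =====
-- stated objective: simpler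
-- what changed: B builds the full index array once and emits each bucket as a clamped slice base[max(0,i-w_size+1):i+1], replacing A's per-index branch between two range constructions.
import Mathlib
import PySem

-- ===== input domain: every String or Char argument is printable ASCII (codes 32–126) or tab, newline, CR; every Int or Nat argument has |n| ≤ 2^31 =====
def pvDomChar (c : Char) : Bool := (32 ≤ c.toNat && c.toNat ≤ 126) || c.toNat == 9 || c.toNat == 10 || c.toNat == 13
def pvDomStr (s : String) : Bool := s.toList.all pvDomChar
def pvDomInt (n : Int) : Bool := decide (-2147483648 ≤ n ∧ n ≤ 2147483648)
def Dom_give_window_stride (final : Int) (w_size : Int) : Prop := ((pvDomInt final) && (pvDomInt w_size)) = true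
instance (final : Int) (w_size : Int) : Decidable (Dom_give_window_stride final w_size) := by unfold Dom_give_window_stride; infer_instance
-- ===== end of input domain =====

-- B builds the index array once and slices a clamped window out of it, replacing A's per-index range construction and branch (simpler, same cost).

-- ===== PORT A =====
def give_window_stride (final : Int) (w_size : Int) : List (List Int) :=
  (PySem.List.pyRange 0 final 1).foldl
    (fun each_buckets i =>
      if i < w_size - 1 then
        each_buckets ++ [(PySem.List.pyRange 0 (i + 1) 1).map (fun t => t)]
      else
        each_buckets ++ [(PySem.List.pyRange (i - w_size) i 1).map (fun t => t + 1)])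
    []

-- ===== PORT B =====
def give_window_stride_alt (final : Int) (w_size : Int) : List (List Int) :=
  let base := PySem.List.pyRange 0 final 1
  (PySem.List.pyRange 0 final 1).map
    (fun i => PySem.List.slice base (some (max 0 (i - w_size + 1))) (some (i + 1)))

-- ===== PRECONDITION & SPEC =====
def Spec_give_window_stride (final : Int) (w_size : Int) (out : List (List Int)) : Prop := out = give_window_stride_alt final w_size
instance (final : Int) (w_size : Int) (out : List (List Int)) : Decidable (Spec_give_window_stride final w_size out) := by unfold Spec_give_window_stride; infer_instance

-- ===== CLAIM (what is proved, stated in full; the proofs are below) =====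
def Claim_equal_give_window_stride : Prop := ∀ (final : Int) (w_size : Int), Dom_give_window_stride final w_size → Spec_give_window_stride final w_size (give_window_stride final w_size)

-- ===== LEMMAS AND PROOFS =====

-- slicing [a:b] out of list(range(0, n)) gives list(range(a, b)) when 0 ≤ a ≤ b ≤ n
lemma slice_pyRange_zero (a b n : Int) (h0 : 0 ≤ a) (hab : a ≤ b) (hbn : b ≤ n) :
    PySem.List.slice (PySem.List.pyRange 0 n 1) (some a) (some b) = PySem.List.pyRange a b 1 := by
  rw [PySem.List.slice_toNat _ h0 (le_trans h0 hab)]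
  rw [PySem.List.pyRange_one_append 0 a n h0 (le_trans hab hbn),
      PySem.List.pyRange_one_append a b n hab hbn]
  rw [List.drop_left' (by rw [PySem.List.length_pyRange_one]; omega)]
  rw [List.take_left' (by rw [PySem.List.length_pyRange_one]; omega)]

-- shifting a range by one
lemma map_add_one_pyRange (a b : Int) :
    (PySem.List.pyRange a b 1).map (fun t => t + 1) = PySem.List.pyRange (a + 1) (b + 1) 1 := by
  rw [PySem.List.pyRange_one, PySem.List.pyRange_one, List.map_map]
  rw [show b + 1 - (a + 1) = b - a by ring]
  exact List.map_congr_left (fun k _ => by simp; ring)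

-- ===== VERDICT (by name: the statement is the Claim_ definition above) =====
theorem give_window_stride_spec : Claim_equal_give_window_stride := by
  intro final w_size _
  unfold Spec_give_window_stride give_window_stride give_window_stride_alt
  rw [show (fun (each_buckets : List (List Int)) i =>
      if i < w_size - 1 then
        each_buckets ++ [(PySem.List.pyRange 0 (i + 1) 1).map (fun t => t)]
      else
        each_buckets ++ [(PySem.List.pyRange (i - w_size) i 1).map (fun t => t + 1)]) =
    fun each_buckets i => each_buckets ++
      [if i < w_size - 1 then (PySem.List.pyRange 0 (i + 1) 1).map (fun t => t)
       else (PySem.List.pyRange (i - w_size) i 1).map (fun t => t + 1)] from by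
    funext acc i; split <;> rfl]
  rw [PySem.List.foldl_append_singleton_eq_map]
  rw [List.nil_append]
  apply List.map_congr_left
  intro i hi
  rw [PySem.List.mem_pyRange_one] at hi
  by_cases hlt : i < w_size - 1
  · simp only [if_pos hlt, List.map_id']
    rw [show max 0 (i - w_size + 1) = 0 by omega]
    rw [slice_pyRange_zero 0 (i + 1) final le_rfl (by omega) (by omega)]
  · simp only [if_neg hlt]
    by_cases hw : w_size ≤ 0
    · rw [PySem.List.pyRange_one_eq_nil (by omega), List.map_nil]
      rw [show max 0 (i - w_size + 1) = i - w_size + 1 by omega]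
      rw [PySem.List.slice_toNat _ (by omega : (0:Int) ≤ i - w_size + 1) (by omega : (0:Int) ≤ i + 1)]
      rw [show (i + 1).toNat - (i - w_size + 1).toNat = 0 by omega, List.take_zero]
    · rw [map_add_one_pyRange]
      rw [show max 0 (i - w_size + 1) = i - w_size + 1 by omega]
      rw [slice_pyRange_zero (i - w_size + 1) (i + 1) final (by omega) (by omega) (by omega)]
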